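-- pv_equiv track=rewrite | github.com/agbld/ms_reco_for_esun | utils/hyperparameters_tuning/generate_run_script.py | build_config_and_append
-- ===== SOURCE A (Python) =====
-- def build_config_and_append(hyperparameter_pools: dict, key_index: int, configs_list: list, config: dict):
--     if key_index < len(hyperparameter_pools.keys()):
--         key = list(hyperparameter_pools.keys())[key_index]
--         for value in list(hyperparameter_pools[key]):
--             config[key] = value
--             configs_list = build_config_and_append(hyperparameter_pools, key_index + 1, configs_list, config)
--         return configs_list
--     else:
--         configs_list.append(config.copy())
--         return configs_list
-- ===== SOURCE B (Python) =====
-- def build_config_and_append(hyperparameter_pools: dict, key_index: int, configs_list: list, config: dict):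
--     # Flat, iterative version: build the explicit Cartesian product of the
--     # remaining value pools once, then emit one config copy per combination.
--     keys = list(hyperparameter_pools.keys())[key_index:]
--     combos = [[]]
--     for k in keys:
--         pool = list(hyperparameter_pools[k])
--         combos = [c + [v] for c in combos for v in pool]
--     for combo in combos:
--         for k, v in zip(keys, combo):
--             config[k] = v
--         configs_list.append(config.copy())
--     return configs_list
-- ===== Notes on version B (the rewrite author's own statement) =====
-- stated objective: simpler
-- what changed: Replaces the key-by-key recursion with one flat iterative pass: build the explicit Cartesian product of the remaining value pools with a fold, then emit one config copy per combination.
import Mathlib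
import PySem

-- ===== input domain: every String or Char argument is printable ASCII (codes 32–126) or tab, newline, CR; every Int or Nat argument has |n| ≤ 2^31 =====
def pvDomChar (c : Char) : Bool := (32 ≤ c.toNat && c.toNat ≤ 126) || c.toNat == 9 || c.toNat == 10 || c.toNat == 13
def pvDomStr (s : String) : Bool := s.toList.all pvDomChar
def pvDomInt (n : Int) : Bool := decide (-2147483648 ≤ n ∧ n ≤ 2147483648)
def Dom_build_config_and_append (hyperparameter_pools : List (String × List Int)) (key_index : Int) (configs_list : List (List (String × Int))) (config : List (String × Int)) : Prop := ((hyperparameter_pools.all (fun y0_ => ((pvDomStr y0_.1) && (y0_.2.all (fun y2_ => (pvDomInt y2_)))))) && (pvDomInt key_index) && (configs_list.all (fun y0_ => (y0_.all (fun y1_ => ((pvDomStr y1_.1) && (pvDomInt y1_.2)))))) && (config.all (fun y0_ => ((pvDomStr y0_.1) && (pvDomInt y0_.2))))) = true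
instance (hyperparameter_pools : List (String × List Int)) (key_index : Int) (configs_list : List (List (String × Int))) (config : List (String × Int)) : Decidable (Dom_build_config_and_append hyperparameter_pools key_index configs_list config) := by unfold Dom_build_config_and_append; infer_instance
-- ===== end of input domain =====

-- B replaces A's key-by-key recursion by one flat iterative pass (explicit Cartesian
-- product of the remaining pools, then one config copy per combination); the claim is
-- about the RETURN value only — in Python both A and B mutate configs_list/config in place.

-- ===== PORT A =====
-- A's recursion, with the shared mutable `config` dict made an explicit threaded value:
-- pvGoA returns (configs_list, config-after); the Nat fuel only makes the Int-indexed
-- recursion structural (it is (len(keys) - key_index).toNat at entry, so the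
-- fuel-exhausted branch is unreachable) and changes no computation step.
def pvGoA (d : PySem.Dict String (List Int)) : Nat → Int → List (List (String × Int)) → PySem.Dict String Int → List (List (String × Int)) × PySem.Dict String Int
  | 0, ki, cl, cfg =>
    if ki < (d.keys.length : Int) then (cl, cfg)   -- unreachable: fuel ≥ 1 whenever ki < len
    else (cl ++ [cfg.items], cfg)
  | n + 1, ki, cl, cfg =>
    if ki < (d.keys.length : Int) then
      match PySem.List.pyGet? d.keys ki with
      | none => (cl, cfg)                          -- unreachable: ki in range here
      | some key =>
        -- `for value in list(hyperparameter_pools[key]): config[key] = value; configs_list = recurse(...)`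
        -- (key is drawn from the dict's own keys, so getD's default is unreachable: no KeyError)
        (d.getD key []).foldl (fun st v => pvGoA d n (ki + 1) st.1 (st.2.insert key v)) (cl, cfg)
    else (cl ++ [cfg.items], cfg)

def build_config_and_append (hyperparameter_pools : List (String × List Int)) (key_index : Int) (configs_list : List (List (String × Int))) (config : List (String × Int)) : List (List (String × Int)) :=
  let d := PySem.Dict.mk hyperparameter_pools
  (pvGoA d (((d.keys.length : Int) - key_index).toNat) key_index configs_list (PySem.Dict.mk config)).1

-- ===== PORT B =====
def build_config_and_append_alt (hyperparameter_pools : List (String × List Int)) (key_index : Int) (configs_list : List (List (String × Int))) (config : List (String × Int)) : List (List (String × Int)) :=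
  let d := PySem.Dict.mk hyperparameter_pools
  let keys := PySem.List.slice d.keys (some key_index) none      -- list(pools.keys())[key_index:]
  let combos := keys.foldl (fun combos k =>
      combos.flatMap (fun c => (d.getD k []).map (fun v => c ++ [v]))) [[]]
      -- combos = [c + [v] for c in combos for v in list(pools[k])]
  let res := combos.foldl (fun (st : List (List (String × Int)) × PySem.Dict String Int) combo =>
      let cfg' := (keys.zip combo).foldl (fun dd kv => dd.insert kv.1 kv.2) st.2
      (st.1 ++ [cfg'.items], cfg')) (configs_list, PySem.Dict.mk config)
  res.1

-- ===== PRECONDITION & SPEC =====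
-- Pre_ excludes (a) negative key_index — outside the recursion's natural domain: there A
-- either raises IndexError (key_index < -len) or silently restarts the whole product via
-- Python's negative-index wraparound — and (b) association lists with duplicate keys
-- (in hyperparameter_pools, config, or an element of configs_list), which encode no
-- Python dict at all.
def Pre_build_config_and_append (hyperparameter_pools : List (String × List Int)) (key_index : Int) (configs_list : List (List (String × Int))) (config : List (String × Int)) : Prop :=
  0 ≤ key_index ∧ (hyperparameter_pools.map Prod.fst).Nodup ∧ (config.map Prod.fst).Nodup ∧ ∀ c ∈ configs_list, (c.map Prod.fst).Nodup
instance (hyperparameter_pools : List (String × List Int)) (key_index : Int) (configs_list : List (List (String × Int))) (config : List (String × Int)) : Decidable (Pre_build_config_and_append hyperparameter_pools key_index configs_list config) := by unfold Pre_build_config_and_append; infer_instance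
def pvWitness_build_config_and_append : (List (String × List Int)) × Int × (List (List (String × Int))) × (List (String × Int)) :=
  ([("a", [1, 2]), ("b", [3])], 0, [[("x", 0)]], [("a", 9)])

def Spec_build_config_and_append (hyperparameter_pools : List (String × List Int)) (key_index : Int) (configs_list : List (List (String × Int))) (config : List (String × Int)) (out : List (List (String × Int))) : Prop := out = build_config_and_append_alt hyperparameter_pools key_index configs_list config
instance (hyperparameter_pools : List (String × List Int)) (key_index : Int) (configs_list : List (List (String × Int))) (config : List (String × Int)) (out : List (List (String × Int))) : Decidable (Spec_build_config_and_append hyperparameter_pools key_index configs_list config out) := by unfold Spec_build_config_and_append; infer_instance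

-- ===== CLAIM (what is proved, stated in full; the proofs are below) =====
def Claim_equal_build_config_and_append : Prop := ∀ (hyperparameter_pools : List (String × List Int)) (key_index : Int) (configs_list : List (List (String × Int))) (config : List (String × Int)), Dom_build_config_and_append hyperparameter_pools key_index configs_list config → Pre_build_config_and_append hyperparameter_pools key_index configs_list config → Spec_build_config_and_append hyperparameter_pools key_index configs_list config (build_config_and_append hyperparameter_pools key_index configs_list config)

-- ===== LEMMAS AND PROOFS =====

-- the Cartesian product of the pools of `ks`, leading key slowest (Python's order)
def pvTuples (d : PySem.Dict String (List Int)) : List String → List (List Int)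
  | [] => [[]]
  | k :: rest => (d.getD k []).flatMap (fun v => (pvTuples d rest).map (v :: ·))

-- fold a list of (key, value) assignments into a config dict
def pvIns (zs : List (String × Int)) (c : PySem.Dict String Int) : PySem.Dict String Int :=
  zs.foldl (fun dd kv => dd.insert kv.1 kv.2) c

-- A's recursion over the remaining key list, config threaded exactly as A mutates it
def pvRefA (d : PySem.Dict String (List Int)) : List String → (List (List (String × Int)) × PySem.Dict String Int) → List (List (String × Int)) × PySem.Dict String Int
  | [], st => (st.1 ++ [st.2.items], st.2)
  | k :: rest, st => (d.getD k []).foldl (fun st' v => pvRefA d rest (st'.1, st'.2.insert k v)) st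

-- the invariant on the threaded config: either untouched, or one full assignment of ks
def pvInv (ks : List String) (d0 dd : PySem.Dict String Int) : Prop :=
  dd = d0 ∨ ∃ cb, cb.length = ks.length ∧ dd = pvIns (ks.zip cb) d0

lemma pvIns_cons (k : String) (v : Int) (zs : List (String × Int)) (dd : PySem.Dict String Int) :
    pvIns ((k, v) :: zs) dd = pvIns zs (dd.insert k v) := rfl

lemma pvGoA_eq_refA (d : PySem.Dict String (List Int)) :
    ∀ (n : Nat) (ki : Int), 0 ≤ ki → (d.keys.length - ki).toNat ≤ n →
      ∀ cl cfg, pvGoA d n ki cl cfg = pvRefA d (d.keys.drop ki.toNat) (cl, cfg) := by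
  intro n
  induction n with
  | zero =>
    intro ki h0 hle cl cfg
    have hdrop : d.keys.drop ki.toNat = [] := List.drop_eq_nil_of_le (by omega)
    rw [pvGoA, if_neg (show ¬ (ki < (d.keys.length : Int)) by omega), hdrop, pvRefA]
  | succ n ih =>
    intro ki h0 hle cl cfg
    by_cases h : ki < (d.keys.length : Int)
    · have hlt : ki.toNat < d.keys.length := by omega
      have hdrop : d.keys.drop ki.toNat = d.keys[ki.toNat] :: d.keys.drop (ki.toNat + 1) :=
        List.drop_eq_getElem_cons hlt
      rw [pvGoA, if_pos h, PySem.List.pyGet?_eq_some_getElem d.keys h0 h]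
      rw [hdrop, pvRefA]
      apply PySem.List.foldl_congr_mem
      intro acc v _
      have h1 : ((ki + 1 : Int)).toNat = ki.toNat + 1 := by omega
      rw [ih (ki + 1) (by omega) (by omega), h1]
    · have hdrop : d.keys.drop ki.toNat = [] := List.drop_eq_nil_of_le (by omega)
      rw [pvGoA, if_neg h, hdrop, pvRefA]

lemma pvRefA_fst_of_empty_pool (d : PySem.Dict String (List Int)) :
    ∀ (ks : List String), (∃ k ∈ ks, d.getD k [] = []) →
      ∀ st, (pvRefA d ks st).1 = st.1 := by
  intro ks
  induction ks with
  | nil => rintro ⟨k, hk, -⟩; simp at hk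
  | cons k rest ih =>
    rintro ⟨k0, hk0mem, hk0⟩ st
    rcases List.mem_cons.mp hk0mem with rfl | hmem
    · rw [pvRefA, hk0]; rfl
    · have ihr := ih ⟨k0, hmem, hk0⟩
      rw [pvRefA]
      generalize d.getD k [] = pool
      induction pool generalizing st with
      | nil => rfl
      | cons v vs ihp =>
        rw [List.foldl_cons, ihp, ihr]

lemma pvTuples_eq_nil_of_empty_pool (d : PySem.Dict String (List Int)) :
    ∀ (ks : List String), (∃ k ∈ ks, d.getD k [] = []) → pvTuples d ks = [] := by
  intro ks
  induction ks with
  | nil => rintro ⟨k, hk, -⟩; simp at hk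
  | cons k rest ih =>
    rintro ⟨k0, hk0mem, hk0⟩
    rcases List.mem_cons.mp hk0mem with rfl | hmem
    · rw [pvTuples, hk0]; rfl
    · rw [pvTuples, ih ⟨k0, hmem, hk0⟩]
      simp

lemma pvTuples_length (d : PySem.Dict String (List Int)) :
    ∀ (ks : List String), ∀ c ∈ pvTuples d ks, c.length = ks.length := by
  intro ks
  induction ks with
  | nil => intro c hc; simp [pvTuples] at hc; simp [hc]
  | cons k rest ih =>
    intro c hc
    rw [pvTuples] at hc
    rcases List.mem_flatMap.mp hc with ⟨v, -, hc⟩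
    rcases List.mem_map.mp hc with ⟨c', hc', rfl⟩
    simp [ih c' hc']

-- two inserts at distinct keys commute when the first key is already present
lemma pvInsert_comm (dd : PySem.Dict String Int) (k k' : String) (v v' : Int)
    (hk : dd.contains k = true) (hne : k ≠ k') :
    (dd.insert k' v').insert k v = (dd.insert k v).insert k' v' := by
  have hkk' : (k == k') = false := beq_eq_false_iff_ne.mpr hne
  have hk'k : (k' == k) = false := beq_eq_false_iff_ne.mpr (Ne.symm hne)
  have hck : (dd.insert k' v').contains k = true := by
    rw [PySem.Dict.contains_insert]; simp [hk]
  apply PySem.Dict.ext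
  by_cases h' : dd.contains k' = true
  · have hck' : (dd.insert k v).contains k' = true := by
      rw [PySem.Dict.contains_insert]; simp [h']
    rw [PySem.Dict.items_insert_of_contains _ v hck,
        PySem.Dict.items_insert_of_contains _ v' h',
        PySem.Dict.items_insert_of_contains _ v' hck',
        PySem.Dict.items_insert_of_contains _ v hk]
    rw [List.map_map, List.map_map]
    apply List.map_congr_left
    intro p _
    simp only [Function.comp]
    by_cases hp : p.1 = k
    · simp [hp, hkk', hk'k]
    · by_cases hp' : p.1 = k'
      · simp [hp', hkk', hk'k, beq_eq_false_iff_ne.mpr hp]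
      · simp [beq_eq_false_iff_ne.mpr hp, beq_eq_false_iff_ne.mpr hp']
  · have h'f : dd.contains k' = false := by simpa using h'
    have hck' : (dd.insert k v).contains k' = false := by
      rw [PySem.Dict.contains_insert]; simp [h'f, hk'k]
    rw [PySem.Dict.items_insert_of_contains _ v hck,
        PySem.Dict.items_insert_of_not_contains _ v' h'f,
        PySem.Dict.items_insert_of_not_contains _ v' hck',
        PySem.Dict.items_insert_of_contains _ v hk]
    rw [List.map_append]
    congr 1
    simp [hk'k]
    exact fun hh => absurd hh (Ne.symm hne)

lemma pvIns_insert_comm (zs : List (String × Int)) :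
    ∀ (dd : PySem.Dict String Int) (k : String) (v : Int),
      dd.contains k = true → (∀ p ∈ zs, p.1 ≠ k) →
      (pvIns zs dd).insert k v = pvIns zs (dd.insert k v) := by
  induction zs with
  | nil => intro dd k v _ _; rfl
  | cons p zs ih =>
    intro dd k v hk hzs
    have hpk : p.1 ≠ k := hzs p List.mem_cons_self
    have hk' : (dd.insert p.1 p.2).contains k = true := by
      rw [PySem.Dict.contains_insert]; simp [hk]
    rw [show p = (p.1, p.2) from rfl, pvIns_cons, pvIns_cons]
    rw [ih (dd.insert p.1 p.2) k v hk' (fun q hq => hzs q (List.mem_cons_of_mem _ hq))]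
    rw [pvInsert_comm dd k p.1 v p.2 hk (Ne.symm hpk)]

-- re-assigning the same key set overrides the previous assignment completely
lemma pvIns_override (ks : List String) :
    ∀ (c c' : List Int) (dd : PySem.Dict String Int), ks.Nodup →
      c.length = ks.length → c'.length = ks.length →
      pvIns (ks.zip c) (pvIns (ks.zip c') dd) = pvIns (ks.zip c) dd := by
  induction ks with
  | nil => intro c c' dd _ _ _; simp [pvIns]
  | cons k t ih =>
    intro c c' dd hnd hc hc'
    match c, c' with
    | v :: cv, v' :: cv' =>
      have hknt : k ∉ t := (List.nodup_cons.mp hnd).1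
      have hndt : t.Nodup := (List.nodup_cons.mp hnd).2
      rw [List.zip_cons_cons, List.zip_cons_cons, pvIns_cons, pvIns_cons]
      rw [pvIns_insert_comm (t.zip cv') (dd.insert k v') k v
            (PySem.Dict.contains_insert_self _ _ _)
            (fun p hp => fun hpk => hknt (hpk ▸ (List.of_mem_zip hp).1))]
      rw [PySem.Dict.insert_insert_self]
      exact ih cv cv' (dd.insert k v) hndt (by simpa using hc) (by simpa using hc')

lemma pvInv_insert (ks : List String) (k : String) (v : Int) (d0 dd : PySem.Dict String Int)
    (hnd : (k :: ks).Nodup) (hinv : pvInv (k :: ks) d0 dd) :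
    pvInv ks (d0.insert k v) (dd.insert k v) := by
  have hknt : k ∉ ks := (List.nodup_cons.mp hnd).1
  rcases hinv with rfl | ⟨cb, hlen, rfl⟩
  · exact Or.inl rfl
  · match cb with
    | w :: cw =>
      right
      refine ⟨cw, by simpa using hlen, ?_⟩
      rw [List.zip_cons_cons, pvIns_cons]
      rw [pvIns_insert_comm (ks.zip cw) (d0.insert k w) k v
            (PySem.Dict.contains_insert_self _ _ _)
            (fun p hp => fun hpk => hknt (hpk ▸ (List.of_mem_zip hp).1))]
      rw [PySem.Dict.insert_insert_self]

-- A's recursion, all pools nonempty: closed form of both components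
lemma pvRefA_closed (d : PySem.Dict String (List Int)) :
    ∀ (ks : List String), ks.Nodup → (∀ k ∈ ks, d.getD k [] ≠ []) →
      ∀ (cl : List (List (String × Int))) (d0 dd : PySem.Dict String Int), pvInv ks d0 dd →
        pvRefA d ks (cl, dd) =
          (cl ++ (pvTuples d ks).map (fun c => (pvIns (ks.zip c) d0).items),
           pvIns (ks.zip (ks.map (fun k => (d.getD k []).getLastD 0))) d0) := by
  intro ks
  induction ks with
  | nil =>
    intro _ _ cl d0 dd hinv
    have hdd : dd = d0 := by
      rcases hinv with rfl | ⟨cb, hlen, rfl⟩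
      · rfl
      · simp [pvIns]
    rw [pvRefA, hdd]
    simp [pvTuples, pvIns]
  | cons k t ih =>
    intro hnd hne cl d0 dd hinv
    have hndt : t.Nodup := (List.nodup_cons.mp hnd).2
    have hnet : ∀ k' ∈ t, d.getD k' [] ≠ [] := fun k' hk' => hne k' (List.mem_cons_of_mem _ hk')
    have aux : ∀ (v : Int) (vs : List Int) (cl : List (List (String × Int))) (dd : PySem.Dict String Int),
        pvInv (k :: t) d0 dd →
        List.foldl (fun st' v => pvRefA d t (st'.1, st'.2.insert k v)) (cl, dd) (v :: vs) =
          (cl ++ (v :: vs).flatMap (fun v => (pvTuples d t).map (fun c => (pvIns ((k :: t).zip (v :: c)) d0).items)),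
           pvIns ((k :: t).zip ((v :: vs).getLastD 0 :: t.map (fun k' => (d.getD k' []).getLastD 0))) d0) := by
      intro v vs
      induction vs generalizing v with
      | nil =>
        intro cl dd hinv
        rw [List.foldl_cons, List.foldl_nil]
        rw [ih hndt hnet cl (d0.insert k v) (dd.insert k v) (pvInv_insert t k v d0 dd hnd hinv)]
        refine Prod.ext ?_ ?_
        · simp [List.zip_cons_cons, pvIns_cons]
        · simp [List.zip_cons_cons, pvIns_cons]
      | cons v' vs' ihv =>
        intro cl dd hinv
        rw [List.foldl_cons]
        rw [ih hndt hnet cl (d0.insert k v) (dd.insert k v) (pvInv_insert t k v d0 dd hnd hinv)]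
        have hinv' : pvInv (k :: t) d0
            (pvIns (t.zip (t.map fun k' => (d.getD k' []).getLastD 0)) (d0.insert k v)) := by
          right
          refine ⟨v :: t.map (fun k' => (d.getD k' []).getLastD 0), by simp, ?_⟩
          rw [List.zip_cons_cons, pvIns_cons]
        rw [ihv v' _ _ hinv']
        refine Prod.ext ?_ ?_
        · simp [List.append_assoc, List.zip_cons_cons, pvIns_cons]
        · simp [List.getLastD_cons]
    rcases hpool : d.getD k [] with _ | ⟨v, vs⟩
    · exact absurd hpool (hne k List.mem_cons_self)
    · rw [pvRefA, hpool]
      rw [aux v vs cl dd hinv]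
      refine Prod.ext ?_ ?_
      · rw [pvTuples, hpool]
        simp only [List.map_flatMap, List.map_map]
        simp [Function.comp_def, List.zip_cons_cons, pvIns_cons]
      · simp [hpool]

-- B's first loop builds exactly the tuple list
lemma pvCombos_eq_tuples (d : PySem.Dict String (List Int)) :
    ∀ (ks : List String) (cs : List (List Int)),
      ks.foldl (fun combos k => combos.flatMap (fun c => (d.getD k []).map (fun v => c ++ [v]))) cs
        = cs.flatMap (fun c => (pvTuples d ks).map (c ++ ·)) := by
  intro ks
  induction ks with
  | nil =>
    intro cs
    simp [pvTuples]
  | cons k t ih =>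
    intro cs
    rw [List.foldl_cons, ih]
    rw [pvTuples]
    simp only [List.flatMap_assoc, List.flatMap_map, List.map_flatMap, List.map_map]
    simp [Function.comp_def, List.append_assoc]

-- B's second loop: closed form of the emitted configs
lemma pvEmit_closed (d : PySem.Dict String (List Int)) (ks : List String) (hnd : ks.Nodup) :
    ∀ (cs : List (List Int)), (∀ c ∈ cs, c.length = ks.length) →
      ∀ (cl : List (List (String × Int))) (d0 dd : PySem.Dict String Int), pvInv ks d0 dd →
        (cs.foldl (fun (st : List (List (String × Int)) × PySem.Dict String Int) combo =>
            let cfg' := (ks.zip combo).foldl (fun dd kv => dd.insert kv.1 kv.2) st.2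
            (st.1 ++ [cfg'.items], cfg')) (cl, dd)).1
          = cl ++ cs.map (fun c => (pvIns (ks.zip c) d0).items) := by
  intro cs
  induction cs with
  | nil => intro _ cl d0 dd _; simp
  | cons c cs' ih =>
    intro hlen cl d0 dd hinv
    rw [List.foldl_cons]
    have hc : (ks.zip c).foldl (fun dd kv => dd.insert kv.1 kv.2) dd = pvIns (ks.zip c) d0 := by
      rcases hinv with rfl | ⟨cb, hlenb, rfl⟩
      · rfl
      · exact pvIns_override ks c cb d0 hnd (hlen c List.mem_cons_self) hlenb
    simp only [hc]
    rw [ih (fun c' hc' => hlen c' (List.mem_cons_of_mem _ hc')) (cl ++ [(pvIns (ks.zip c) d0).items]) d0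
          (pvIns (ks.zip c) d0) (Or.inr ⟨c, hlen c List.mem_cons_self, rfl⟩)]
    simp

-- common closed form for the A side
lemma pvRefA_fst (d : PySem.Dict String (List Int)) (ks : List String) (hnd : ks.Nodup)
    (cl : List (List (String × Int))) (d0 : PySem.Dict String Int) :
    (pvRefA d ks (cl, d0)).1 = cl ++ (pvTuples d ks).map (fun c => (pvIns (ks.zip c) d0).items) := by
  by_cases hemp : ∃ k ∈ ks, d.getD k [] = []
  · rw [pvRefA_fst_of_empty_pool d ks hemp, pvTuples_eq_nil_of_empty_pool d ks hemp]
    simp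
  · push_neg at hemp
    rw [pvRefA_closed d ks hnd hemp cl d0 d0 (Or.inl rfl)]

-- ===== VERDICT (by name: the statement is the Claim_ definition above) =====
theorem build_config_and_append_spec : Claim_equal_build_config_and_append := by
  intro pools ki cl cfg _hdom hpre
  obtain ⟨hki, hnodup, -, -⟩ := hpre
  unfold Spec_build_config_and_append
  simp only [build_config_and_append, build_config_and_append_alt]
  have hkeys : (PySem.Dict.mk pools).keys.Nodup := by
    simpa [PySem.Dict.keys_mk] using hnodup
  have hslice : PySem.List.slice (PySem.Dict.mk pools).keys (some ki) none
      = (PySem.Dict.mk pools).keys.drop ki.toNat := by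
    conv_lhs => rw [show ki = ((ki.toNat : Nat) : Int) from (Int.toNat_of_nonneg hki).symm]
    exact PySem.List.slice_from_natCast _ _
  have hnd : ((PySem.Dict.mk pools).keys.drop ki.toNat).Nodup :=
    (List.drop_sublist _ _).nodup hkeys
  rw [pvGoA_eq_refA (PySem.Dict.mk pools) (((PySem.Dict.mk pools).keys.length - ki).toNat) ki hki
        (le_refl _) cl (PySem.Dict.mk cfg)]
  rw [pvRefA_fst (PySem.Dict.mk pools) _ hnd]
  rw [hslice, pvCombos_eq_tuples]
  have hcs : ([([] : List Int)]).flatMap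
      (fun c => (pvTuples (PySem.Dict.mk pools) ((PySem.Dict.mk pools).keys.drop ki.toNat)).map (c ++ ·))
      = pvTuples (PySem.Dict.mk pools) ((PySem.Dict.mk pools).keys.drop ki.toNat) := by
    simp
  rw [hcs]
  rw [pvEmit_closed (PySem.Dict.mk pools) _ hnd _
        (pvTuples_length (PySem.Dict.mk pools) _) cl (PySem.Dict.mk cfg) (PySem.Dict.mk cfg) (Or.inl rfl)]
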